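-- pv_equiv track=rewrite | github.com/bbig3831/100daysofpython | days7-9/states.py | get_longest_state
-- ===== SOURCE A (Python) =====
-- from collections import defaultdict
--
-- def get_longest_state(data):
--     """Receives data, which can be the us_state_abbrev dict or the states
--        list (see above). It returns the longest state measured by the length
--        of the string"""
--     if type(data) == dict:
--         data = data.keys()
--
--     state_list = [(state, len(state)) for state in data]
--     lengths = defaultdict(list)
--
--     for state, length in state_list:
--         lengths[length].append(state)
--
--     return lengths[max(lengths.keys())][0]
-- ===== SOURCE B (Python) =====
-- def get_longest_state(data):
--     """Receives data, which can be the us_state_abbrev dict or the states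
--        list. Returns the first state of maximal string length."""
--     if type(data) == dict:
--         data = data.keys()
--     return max(data, key=len)
-- ===== Notes on version B (the rewrite author's own statement) =====
-- stated objective: idiomatic
-- what changed: Replaces the grouping defaultdict plus max-over-keys plus [0] indexing with a single linear reduction max(data, key=len), which returns the first longest element directly.
-- outside the precondition, e.g. on get_longest_state([]): A raises ValueError, B raises ValueError
import Mathlib
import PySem

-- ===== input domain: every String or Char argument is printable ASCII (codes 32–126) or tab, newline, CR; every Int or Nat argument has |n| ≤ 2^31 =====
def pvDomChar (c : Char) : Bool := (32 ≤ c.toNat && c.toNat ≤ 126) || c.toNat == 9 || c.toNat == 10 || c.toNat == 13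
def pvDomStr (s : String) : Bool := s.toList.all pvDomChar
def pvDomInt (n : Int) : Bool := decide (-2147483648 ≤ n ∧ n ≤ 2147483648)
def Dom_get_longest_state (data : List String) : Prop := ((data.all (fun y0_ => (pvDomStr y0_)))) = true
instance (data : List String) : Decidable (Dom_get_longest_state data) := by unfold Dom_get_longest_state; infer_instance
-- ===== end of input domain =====

-- B replaces A's grouping-dict construction (defaultdict by length, max over keys, [0])
-- with the idiomatic single reduction max(data, key=len); same first-longest result.


-- ===== PORT A =====
-- 'if type(data) == dict: data = data.keys()' never fires: under the type convention
-- the parameter is a list of strings, never a dict.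
def get_longest_state (data : List String) : String :=
  let state_list := data.map (fun state => (state, PySem.Str.len state))
  let lengths := state_list.foldl
    (fun d p => d.modify p.2 [] (fun l => l ++ [p.1])) (PySem.Dict.empty : PySem.Dict Int (List String))
  match PySem.List.max? lengths.keys (fun k => k) with
  | none => ""           -- max() of no keys raises ValueError; excluded by Pre_
  | some m => ((PySem.List.pyGet? (lengths.getD m []) 0).getD "")   -- [0]; the group is nonempty whenever reached

-- ===== PORT B =====
-- same dict coercion line never fires (list input); max(data, key=len)
def get_longest_state_alt (data : List String) : String :=
  (PySem.List.max? data PySem.Str.len).getD ""   -- max([]) raises ValueError; excluded by Pre_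

-- ===== PRECONDITION & SPEC =====
-- Both A and B raise ValueError (max of an empty sequence) on the empty list.
def Pre_get_longest_state (data : List String) : Prop := data ≠ []
instance (data : List String) : Decidable (Pre_get_longest_state data) := by unfold Pre_get_longest_state; infer_instance
def pvWitness_get_longest_state : List String := ["Ohio", "Minnesota", "Iowa"]

def Spec_get_longest_state (data : List String) (out : String) : Prop := out = get_longest_state_alt data
instance (data : List String) (out : String) : Decidable (Spec_get_longest_state data out) := by unfold Spec_get_longest_state; infer_instance

-- ===== CLAIM (what is proved, stated in full; the proofs are below) =====
def Claim_equal_get_longest_state : Prop := ∀ (data : List String), Dom_get_longest_state data → Pre_get_longest_state data → Spec_get_longest_state data (get_longest_state data)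

-- ===== LEMMAS AND PROOFS =====

-- the running 'first maximum' step of max(data, key=len)
def pvStep (m y : String) : String := if PySem.Str.len m < PySem.Str.len y then y else m

theorem pv_max?_cons (x : String) (t : List String) :
    PySem.List.max? (x :: t) PySem.Str.len = some (t.foldl pvStep x) := by
  show List.foldl _ (some x) t = _
  induction t generalizing x with
  | nil => rfl
  | cons y t ih => simpa [pvStep, apply_ite] using ih (pvStep x y)

theorem pv_le_foldl (t : List String) (x : String) :
    PySem.Str.len x ≤ PySem.Str.len (t.foldl pvStep x) ∧
    ∀ y ∈ t, PySem.Str.len y ≤ PySem.Str.len (t.foldl pvStep x) := by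
  induction t generalizing x with
  | nil => simp
  | cons y t ih =>
    obtain ⟨h1, h2⟩ := ih (pvStep x y)
    refine ⟨le_trans ?_ h1, ?_⟩
    · unfold pvStep; split <;> omega
    · intro z hz
      rcases List.mem_cons.mp hz with rfl | hz
      · refine le_trans ?_ h1; unfold pvStep; split <;> omega
      · exact h2 z hz

theorem pv_foldl_cases (t : List String) (x : String) :
    t.foldl pvStep x = x ∨
      (t.foldl pvStep x ∈ t ∧ PySem.Str.len x < PySem.Str.len (t.foldl pvStep x)) := by
  induction t generalizing x with
  | nil => exact Or.inl rfl
  | cons y t ih =>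
    show t.foldl pvStep (pvStep x y) = x ∨
      (t.foldl pvStep (pvStep x y) ∈ y :: t ∧
        PySem.Str.len x < PySem.Str.len (t.foldl pvStep (pvStep x y)))
    rcases ih (pvStep x y) with h | ⟨hm, hl⟩
    · rw [h]; unfold pvStep
      split
      · next hlt => exact Or.inr ⟨List.mem_cons_self, hlt⟩
      · exact Or.inl rfl
    · refine Or.inr ⟨List.mem_cons_of_mem _ hm, lt_of_le_of_lt ?_ hl⟩
      unfold pvStep; split <;> omega

theorem pv_mem_foldl (t : List String) (x : String) : t.foldl pvStep x ∈ x :: t := by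
  rcases pv_foldl_cases t x with h | ⟨h, _⟩
  · rw [h]; exact List.mem_cons_self
  · exact List.mem_cons_of_mem _ h

-- the first maximal element heads the filter at the maximal length
theorem pv_filter_head (t : List String) (x : String) :
    ∃ l, (x :: t).filter
        (fun s => PySem.Str.len s == PySem.Str.len (t.foldl pvStep x)) =
      (t.foldl pvStep x) :: l := by
  induction t generalizing x with
  | nil => exact ⟨[], by simp⟩
  | cons y t ih =>
    show ∃ l, List.filter
        (fun s => PySem.Str.len s == PySem.Str.len (t.foldl pvStep (pvStep x y)))
        (x :: y :: t) = t.foldl pvStep (pvStep x y) :: l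
    by_cases hlt : PySem.Str.len x < PySem.Str.len y
    · have hx' : pvStep x y = y := by unfold pvStep; simp only [if_pos hlt]
      rw [hx']
      have hyb := (pv_le_foldl t y).1
      obtain ⟨l, hl⟩ := ih y
      exact ⟨l, by rw [List.filter_cons_of_neg (by simp only [beq_iff_eq]; omega), hl]⟩
    · have hx' : pvStep x y = x := by unfold pvStep; simp only [if_neg hlt]
      rw [hx']
      obtain ⟨l, hl⟩ := ih x
      by_cases hxe : PySem.Str.len x = PySem.Str.len (t.foldl pvStep x)
      · have hbx : t.foldl pvStep x = x := by
          rcases pv_foldl_cases t x with h | ⟨_, h⟩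
          · exact h
          · omega
        rw [hbx]
        exact ⟨List.filter (fun s => PySem.Str.len s == PySem.Str.len x) (y :: t),
          List.filter_cons_of_pos (by simp)⟩
      · have hxlt : PySem.Str.len x < PySem.Str.len (t.foldl pvStep x) :=
          lt_of_le_of_ne (pv_le_foldl t x).1 hxe
        rw [List.filter_cons_of_neg (by simp only [beq_iff_eq]; omega)] at hl
        exact ⟨l, by
          rw [List.filter_cons_of_neg (by simp only [beq_iff_eq]; omega),
            List.filter_cons_of_neg (by simp only [beq_iff_eq]; omega), hl]⟩

-- the grouping loop keyed on the pair's second component, seen through Prod.swap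
theorem pv_group (xs : List String) (K : Int) :
    List.map (fun p => p.2)
      (List.filter (fun p => p.1 == K) (xs.map (fun s => (PySem.Str.len s, s))))
    = xs.filter (fun s => PySem.Str.len s == K) := by
  simp [List.filter_map, Function.comp_def, List.map_map]

theorem get_longest_state_spec' (data : List String)
    (hpre : Pre_get_longest_state data) :
    get_longest_state data = get_longest_state_alt data := by
  unfold get_longest_state get_longest_state_alt
  obtain ⟨x, t, rfl⟩ : ∃ x t, data = x :: t := by
    cases data with
    | nil => exact absurd rfl hpre
    | cons x t => exact ⟨x, t, rfl⟩
  simp only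
  rw [pv_max?_cons]
  have hkeys :
      (((x :: t).map (fun s => (s, PySem.Str.len s))).foldl
        (fun d p => d.modify p.2 [] (fun l => l ++ [p.1]))
        (PySem.Dict.empty : PySem.Dict Int (List String))).keys
      = PySem.Set.ofList ((x :: t).map (fun s => PySem.Str.len s)) := by
    rw [PySem.Dict.keys_foldl_modify_key
      (l := (x :: t).map (fun s => (s, PySem.Str.len s)))
      (key := fun p => p.2) (d0 := []) (f := fun _ p l => l ++ [p.1])
      (d := PySem.Dict.empty)]
    simp [List.map_map, Function.comp_def, PySem.Set.update, PySem.Set.ofList,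
      PySem.Dict.empty, PySem.Dict.keys, PySem.Str.len_eq]
  rw [hkeys]
  rcases hmax : PySem.List.max? (PySem.Set.ofList ((x :: t).map (fun s => PySem.Str.len s))) (fun k => k)
    with _ | K
  · exfalso
    have hx : PySem.Str.len x ∈ PySem.Set.ofList ((x :: t).map (fun s => PySem.Str.len s)) := by
      rw [PySem.Set.mem_ofList]; simp
    rw [(PySem.List.max?_eq_none_iff _ _).mp hmax] at hx
    exact (List.not_mem_nil).elim hx
  · have hKmem : K ∈ (x :: t).map PySem.Str.len := by
      have := PySem.List.max?_mem hmax
      rwa [PySem.Set.mem_ofList] at this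
    have hKmax : ∀ y ∈ (x :: t).map PySem.Str.len, y ≤ K := fun y hy =>
      PySem.List.max?_isMax hmax y ((PySem.Set.mem_ofList _ _).mpr hy)
    have hKb : K = PySem.Str.len (t.foldl pvStep x) := by
      obtain ⟨s, hs, rfl⟩ := List.mem_map.mp hKmem
      have h1 : PySem.Str.len s ≤ PySem.Str.len (t.foldl pvStep x) := by
        rcases List.mem_cons.mp hs with rfl | hs
        · exact (pv_le_foldl t s).1
        · exact (pv_le_foldl t x).2 s hs
      have h2 : PySem.Str.len (t.foldl pvStep x) ≤ PySem.Str.len s :=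
        hKmax _ (List.mem_map_of_mem (pv_mem_foldl t x))
      omega
    have hswap :
        ((x :: t).map (fun s => (s, PySem.Str.len s))).foldl
          (fun d p => d.modify p.2 [] (fun l => l ++ [p.1]))
          (PySem.Dict.empty : PySem.Dict Int (List String))
        = ((x :: t).map (fun s => (PySem.Str.len s, s))).foldl
          (fun d p => d.modify p.1 [] (fun l => l ++ [p.2]))
          (PySem.Dict.empty : PySem.Dict Int (List String)) := by
      simp [List.foldl_map]
    simp only [hswap]
    rw [PySem.Dict.getD_foldl_modify_append,
      show (PySem.Dict.empty : PySem.Dict Int (List String)).getD K [] = [] from rfl,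
      List.nil_append, pv_group, hKb]
    obtain ⟨l, hl⟩ := pv_filter_head t x
    rw [hl]
    simp [PySem.List.pyGet?, PySem.List.pyIdx?]

-- ===== VERDICT (by name: the statement is the Claim_ definition above) =====
theorem get_longest_state_spec : Claim_equal_get_longest_state := by
  intro data _ hpre
  exact get_longest_state_spec' data hpre
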